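-- pv_equiv track=rewrite | github.com/isKage/bidms-dsa-pj | core/services/data_structures/utils/pattern_matching.py | find_all_from_list
-- ===== SOURCE A (Python) =====
-- def compute_kmp_fail(pattern):
--     """计算模式的失败函数"""
--     m = len(pattern)
--     fail = [0] * m
--     j = 1
--     k = 0
--     while j < m:
--         if pattern[j] == pattern[k]:
--             fail[j] = k + 1
--             j += 1
--             k += 1
--         elif k > 0:
--             k = fail[k - 1]
--         else:
--             j += 1
--     return fail
--
-- def find_all_from_list(pattern: str, texts, sep="*"):
--     """
--     对于字符串列表 text_list 返回所有包含 pattern 的索引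
--     :param pattern: 匹配模式
--     :param texts: 字符串列表 ["text1", "text2", ...] or "text1*text2*...*"
--     :param sep: 特殊分割符, 默认为 "*" , 要求一定不在 text_list 所含有的字符里
--     :return: text_list 包含 pattern 的索引 [idx1, idx2, ...]
--     """
--     m = len(pattern)
--     if isinstance(texts, list):
--         text = sep.join(texts) + sep
--         if m == 0:  # 简单情况, 全部匹配
--             return [i for i in range(len(texts))]
--     else:
--         text = texts
--         if m == 0:  # 简单情况, 全部匹配
--             all_length = len(text.split(sep)) - 1
--             return [i for i in range(all_length)]
--
--     n = len(text)
--
--     fail = compute_kmp_fail(pattern)  # 失败函数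
--     k, j = 0, 0  # k 在 pattern 上遍历, j 在 text 上遍历
--
--     match = []  # 记录索引
--     texts_num = 0  # 记录目前位于 text_list 的第几段
--
--     # 开始匹配
--     while j < n:  # j 在 text 上遍历
--         if text[j] == sep:
--             texts_num += 1  # 检索到了 sep 说明没有匹配进入下一段
--
--         # 开始逐个字符匹配
--         if text[j] == pattern[k]:  # 当前字符匹配成功
--             if k == m - 1:  # 完全匹配, 加入结果集
--                 match.append(texts_num)
--                 # 直接去往下一段
--                 texts_num += 1
--                 while text[j] != sep:  # 不用比较
--                     j += 1
--                 j += 1  # text 中下一段第一个字符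
--                 k = 0  # 从 pattern 第一个字符开始
--             else:  # 继续寻找
--                 j += 1
--                 k += 1
--         elif k > 0:  # 之前存在匹配项, 失败函数返回下一步索引位置
--             k = fail[k - 1]
--         else:  # 当前字符未匹配, j 后移
--             j += 1
--     return match
-- ===== SOURCE B (Python) =====
-- def find_all_from_list(pattern: str, texts, sep="*"):
--     """Return the indices of the entries that contain pattern as a substring."""
--     if isinstance(texts, str):
--         texts = texts.split(sep)[:-1]
--     return [i for i, u in enumerate(texts) if pattern in u]
-- ===== Notes on version B (the rewrite author's own statement) =====
-- stated objective: simpler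
-- what changed: B drops the join-with-sentinel text, the hand-written KMP failure function and the fused scanner with its segment counter: it simply tests each list entry with Python's built-in substring operator and returns the matching positions from enumerate; Pre_ excludes only off-contract inputs (sep occurring in pattern or an entry, or multi-char sep) on which the pattern still occurs in the joined text, where A raises IndexError or reports sub-segment indices that are not list positions.
-- intended difference: On inputs where an entry containing the pattern is preceded by an entry that lacks the pattern but ends with a nonempty proper prefix of it, A returns indices shifted upward (its scanner re-counts the separator once per such prefix, e.g. [2] for ('ab', ['xa','ab'], '*')), while B returns the actual list positions ([1]), which is what an index-of-matching-entries function must return. — e.g. on find_all_from_list("ab", ["xa", "ab"], "*"): A returns [2], B returns [1]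
-- outside the precondition, e.g. on find_all_from_list('a*b', ['a', 'b'], '*'): A returns [1], B returns []; on find_all_from_list('b', ['a*b'], '*'): A returns [1], B returns [0]; on find_all_from_list('ab', ['ab'], '**'): A raises IndexError, B returns [0]
import Mathlib
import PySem

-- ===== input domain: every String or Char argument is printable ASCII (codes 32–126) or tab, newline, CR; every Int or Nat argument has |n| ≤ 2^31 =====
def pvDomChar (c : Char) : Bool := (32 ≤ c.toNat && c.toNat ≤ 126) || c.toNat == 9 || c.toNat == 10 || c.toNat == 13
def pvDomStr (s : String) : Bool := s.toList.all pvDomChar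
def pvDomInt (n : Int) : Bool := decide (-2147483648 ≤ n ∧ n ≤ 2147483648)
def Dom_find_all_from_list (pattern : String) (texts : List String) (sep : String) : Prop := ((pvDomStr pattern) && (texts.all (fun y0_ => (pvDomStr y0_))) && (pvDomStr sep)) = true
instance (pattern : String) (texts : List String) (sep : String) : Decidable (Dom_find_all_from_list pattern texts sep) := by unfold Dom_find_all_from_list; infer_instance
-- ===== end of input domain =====

-- B replaces A's joined-text fused KMP scan with a per-element built-in substring test (simpler);
-- on segments ending in a pattern prefix A's counter over-advances, which B does not reproduce (see D_).

-- ===== PORT A =====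
-- helper: Python's compute_kmp_fail while-loop (fuel only makes the same loop total; 2*m steps always suffice)
def pvKmpFailLoop (p : List Char) (m : Nat) : Nat → Nat → Nat → List Nat → List Nat
  | 0, _, _, fail => fail
  | fuel+1, j, k, fail =>
    if j < m then
      if p.getD j ' ' = p.getD k ' ' then pvKmpFailLoop p m fuel (j+1) (k+1) (fail.set j (k+1))
      else if 0 < k then pvKmpFailLoop p m fuel j (fail.getD (k-1) 0) fail
      else pvKmpFailLoop p m fuel (j+1) k fail
    else fail

-- compute_kmp_fail(pattern)
def pvKmpFail (p : List Char) : List Nat :=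
  pvKmpFailLoop p p.length (2 * p.length) 1 0 (List.replicate p.length 0)

-- the inner `while text[j] != sep: j += 1` followed by `j += 1` (bails at end of text, where Python raises — outside Pre_)
def pvSkipToSep (t sl : List Char) : Nat → Nat → Nat
  | 0, j => j
  | fuel+1, j =>
    if j < t.length then
      if [t.getD j ' '] = sl then j + 1 else pvSkipToSep t sl fuel (j + 1)
    else j

-- the main `while j < n` loop; state (j, k, texts_num, match); fuel only makes the loop total
def pvMainLoop (p t sl : List Char) (fail : List Nat) (m : Nat) : Nat → Nat → Nat → Nat → List Int → List Int
  | 0, _, _, _, acc => acc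
  | fuel+1, j, k, tnum, acc =>
    if j < t.length then
      -- `if text[j] == sep: texts_num += 1` (text[j] is a 1-char string, equal to sep iff sep is that single char)
      let tn1 := if [t.getD j ' '] = sl then tnum + 1 else tnum
      if t.getD j ' ' = p.getD k ' ' then
        if k = m - 1 then
          pvMainLoop p t sl fail m fuel (pvSkipToSep t sl t.length j) 0 (tn1 + 1) (acc ++ [(tn1 : Int)])
        else pvMainLoop p t sl fail m fuel (j + 1) (k + 1) tn1 acc
      else if 0 < k then pvMainLoop p t sl fail m fuel j (fail.getD (k - 1) 0) tn1 acc
      else pvMainLoop p t sl fail m fuel (j + 1) k tn1 acc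
    else acc

def find_all_from_list (pattern : String) (texts : List String) (sep : String) : List Int :=
  let m := pattern.toList.length
  if m = 0 then PySem.List.pyRange 0 (PySem.List.len texts) 1
  else
    -- text = sep.join(texts) + sep  (kept on List Char; Lean's String append is kernel-opaque)
    let t := PySem.Chars.join sep.toList (texts.map String.toList) ++ sep.toList
    pvMainLoop pattern.toList t sep.toList (pvKmpFail pattern.toList) m (2 * t.length + m + 1) 0 0 0 []

-- ===== PORT B =====
-- Source B: `[i for i, u in enumerate(texts) if pattern in u]` (its isinstance(str) branch is the other input type)
def find_all_from_list_alt (pattern : String) (texts : List String) (sep : String) : List Int :=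
  ((PySem.List.enumerate texts 0).filter
      (fun iu => PySem.Chars.isIn pattern.toList iu.2.toList)).map (fun iu => iu.1)

-- ===== PRECONDITION & SPEC =====
-- Pre_ admits: the empty pattern; the module's documented contract (sep a single character occurring
-- neither in pattern nor in any element); and any input whose pattern does not occur in the joined
-- text at all (A then returns []).  Excluded are only inputs outside the contract on which the
-- pattern does occur somewhere in the sep-joined text: there A either raises IndexError (multi-char
-- sep: the inner skip loop runs off the end) or reports indices of sub-segments of the joined text
-- that do not correspond to list positions (sep inside an element or inside pattern).
-- plain substring test (tail-recursive; proved equal to <:+: in pvOccB_iff below)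
def pvOccB (p : List Char) : List Char → Bool
  | [] => p.isEmpty
  | c :: rest => p.isPrefixOf (c :: rest) || pvOccB p rest

def Pre_find_all_from_list (pattern : String) (texts : List String) (sep : String) : Prop :=
  pattern.toList = [] ∨
  (sep.toList.length = 1 ∧
    (sep.toList.all fun ch => !pattern.toList.contains ch && texts.all fun t => !t.toList.contains ch) = true) ∨
  pvOccB pattern.toList
    (PySem.Chars.join sep.toList (texts.map String.toList) ++ sep.toList) = false
instance (pattern : String) (texts : List String) (sep : String) : Decidable (Pre_find_all_from_list pattern texts sep) := by
  unfold Pre_find_all_from_list; infer_instance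

def pvWitness_find_all_from_list : String × List String × String := ("ab", ["xaby", "b"], "*")

-- On inputs where some entry containing the pattern is preceded by an entry that does not contain it
-- but ends with a nonempty proper prefix of it, A returns shifted (too large) indices, because its
-- scanner's failure-function fallback re-counts the separator once per such prefix; B returns the
-- actual list positions, which is what an index-of-matching-entries function is meant to return.
def pvBadB (p u : List Char) : Bool :=
  !(PySem.Chars.isIn p u) &&
    (List.range u.length).any (fun d => decide (u.drop d <+: p) && decide (u.length - d < p.length))

-- scan with a flag: "some entry containing p is preceded by a bad entry"
def pvShifted (p : List Char) : List (List Char) → Bool → Bool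
  | [], _ => false
  | u :: rest, seen => (seen && PySem.Chars.isIn p u) || pvShifted p rest (seen || pvBadB p u)

def D_find_all_from_list (pattern : String) (texts : List String) (sep : String) : Prop :=
  pvShifted pattern.toList (texts.map (fun t => t.toList)) false = true
instance (pattern : String) (texts : List String) (sep : String) : Decidable (D_find_all_from_list pattern texts sep) := by
  unfold D_find_all_from_list; infer_instance

def Spec_find_all_from_list (pattern : String) (texts : List String) (sep : String) (out : List Int) : Prop :=
  ¬ D_find_all_from_list pattern texts sep → out = find_all_from_list_alt pattern texts sep
instance (pattern : String) (texts : List String) (sep : String) (out : List Int) : Decidable (Spec_find_all_from_list pattern texts sep out) := by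
  unfold Spec_find_all_from_list; infer_instance

def pvDiffWitness_find_all_from_list : String × List String × String := ("ab", ["xa", "ab"], "*")
def pvDiffWitnessOut_find_all_from_list : (List Int) × (List Int) := ([2], [1])

-- ===== CLAIM (what is proved, stated in full; the proofs are below) =====
def Claim_unchanged_find_all_from_list : Prop := ∀ (pattern : String) (texts : List String) (sep : String), Dom_find_all_from_list pattern texts sep → Pre_find_all_from_list pattern texts sep → Spec_find_all_from_list pattern texts sep (find_all_from_list pattern texts sep)
def Claim_changed_find_all_from_list : Prop := Dom_find_all_from_list (pvDiffWitness_find_all_from_list.1) (pvDiffWitness_find_all_from_list.2.1) (pvDiffWitness_find_all_from_list.2.2) ∧ Pre_find_all_from_list (pvDiffWitness_find_all_from_list.1) (pvDiffWitness_find_all_from_list.2.1) (pvDiffWitness_find_all_from_list.2.2) ∧ D_find_all_from_list (pvDiffWitness_find_all_from_list.1) (pvDiffWitness_find_all_from_list.2.1) (pvDiffWitness_find_all_from_list.2.2) ∧ find_all_from_list (pvDiffWitness_find_all_from_list.1) (pvDiffWitness_find_all_from_list.2.1) (pvDiffWitness_find_all_from_list.2.2) = pvDiffWitnessOut_find_all_from_list.1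 ∧ find_all_from_list_alt (pvDiffWitness_find_all_from_list.1) (pvDiffWitness_find_all_from_list.2.1) (pvDiffWitness_find_all_from_list.2.2) = pvDiffWitnessOut_find_all_from_list.2 ∧ pvDiffWitnessOut_find_all_from_list.1 ≠ pvDiffWitnessOut_find_all_from_list.2
def Claim_exact_find_all_from_list : Prop := ∀ (pattern : String) (texts : List String) (sep : String), Dom_find_all_from_list pattern texts sep → Pre_find_all_from_list pattern texts sep → D_find_all_from_list pattern texts sep → find_all_from_list pattern texts sep ≠ find_all_from_list_alt pattern texts sep

-- ===== LEMMAS AND PROOFS =====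

-- ---- generic suffix/prefix facts ----

lemma pvSuffix_concat_iff {s t : List Char} {a b : Char} :
    (s ++ [a]) <:+ (t ++ [b]) ↔ a = b ∧ s <:+ t := by
  constructor
  · rintro ⟨w, hw⟩
    rw [← List.append_assoc, ← List.concat_eq_append, ← List.concat_eq_append] at hw
    have := List.concat_inj.mp hw
    exact ⟨this.2, w, this.1⟩
  · rintro ⟨rfl, w, rfl⟩
    exact ⟨w, by simp⟩

-- p.take (b+1) is a suffix of u.take (d+1) iff p.take b suffixes u.take d and the next chars agree
lemma pvTake_suffix_succ_iff (p u : List Char) (b d : Nat) (hb : b < p.length) (hd : d < u.length) :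
    p.take (b+1) <:+ u.take (d+1) ↔ (p.take b <:+ u.take d ∧ p[b] = u[d]) := by
  rw [List.take_add_one, List.take_add_one,
      List.getElem?_eq_getElem hb, List.getElem?_eq_getElem hd]
  simp only [Option.toList_some]
  rw [pvSuffix_concat_iff]
  tauto

lemma pvInfix_iff_suffix_take {p u : List Char} :
    p <:+: u ↔ ∃ e, e ≤ u.length ∧ p <:+ u.take e := by
  constructor
  · rintro ⟨s, t2, rfl⟩
    refine ⟨s.length + p.length, by simp, ⟨s, ?_⟩⟩
    rw [show s.length + p.length = (s ++ p).length by simp, List.take_left]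
  · rintro ⟨e, he, hs⟩
    exact hs.isInfix.trans (List.take_prefix e u).isInfix

-- ---- border machinery and the failure-table specification ----

def pvBord (p : List Char) (l k : Nat) : Prop := k < l ∧ p.take k <:+ p.take l

def pvMaxB (p : List Char) (l k : Nat) : Prop := pvBord p l k ∧ ∀ b, pvBord p l b → b ≤ k

def pvFailSpec (p : List Char) (fail : List Nat) : Prop :=
  fail.length = p.length ∧ ∀ i, i < p.length → pvMaxB p (i+1) (fail.getD i 0)

lemma pvBord_zero (p : List Char) (l : Nat) (h : 0 < l) : pvBord p l 0 :=
  ⟨h, by simp⟩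

lemma pvBord_trans {p : List Char} {l k k' : Nat} (h1 : pvBord p l k) (h2 : pvBord p k k') :
    pvBord p l k' :=
  ⟨h2.1.trans h1.1, List.IsSuffix.trans h2.2 h1.2⟩

lemma pvFailSpec_lt {p : List Char} {fail : List Nat} (hf : pvFailSpec p fail) {k : Nat}
    (hk : 0 < k) (hkm : k ≤ p.length) : fail.getD (k-1) 0 < k := by
  have h := (hf.2 (k-1) (by omega)).1.1
  omega

-- take b' is a border of take k when both are p-prefix-suffixes of the same list
lemma pvBord_of_two_suffix {p x : List Char} {b k : Nat} (hb : p.take b <:+ x)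
    (hk : p.take k <:+ x) (hlt : b < k) (hkm : k ≤ p.length) : pvBord p k b := by
  refine ⟨hlt, List.suffix_of_suffix_length_le hb hk ?_⟩
  simp only [List.length_take]
  omega

lemma pvKmpFailAux (p : List Char) :
    ∀ fuel j k fail,
    1 ≤ j → j ≤ p.length → fail.length = p.length →
    (∀ i, i < j → pvMaxB p (i+1) (fail.getD i 0)) →
    (∀ i, j ≤ i → i < p.length → fail.getD i 0 = 0) →
    pvBord p j k →
    (j < p.length → ∀ b, pvBord p (j+1) b → b ≤ k + 1) →
    fuel ≥ 2 * (p.length - j) + k + 1 →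
    pvFailSpec p (pvKmpFailLoop p p.length fuel j k fail) := by
  intro fuel
  induction fuel using Nat.strong_induction_on with
  | _ fuel ih =>
    intro j k fail hj1 hjm hlen hdone hzero hbord hmax hfuel
    obtain ⟨f, rfl⟩ : ∃ f, fuel = f + 1 := ⟨fuel - 1, by omega⟩
    rw [pvKmpFailLoop]
    by_cases hjlt : j < p.length
    · rw [if_pos hjlt]
      have hkj : k < j := hbord.1
      have hkm : k < p.length := by omega
      by_cases hch : p.getD j ' ' = p.getD k ' '
      · rw [if_pos hch]
        have hchar : p[k] = p[j] := by
          rw [List.getD_eq_getElem _ _ hjlt, List.getD_eq_getElem _ _ hkm] at hch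
          exact hch.symm
        have hnewb : pvBord p (j+1) (k+1) :=
          ⟨by omega, (pvTake_suffix_succ_iff p p k j hkm hjlt).mpr ⟨hbord.2, hchar⟩⟩
        have hnewmax : pvMaxB p (j+1) (k+1) := ⟨hnewb, hmax hjlt⟩
        apply ih f (by omega) (j+1) (k+1) (fail.set j (k+1)) (by omega) (by omega)
          (by simpa using hlen)
        · intro i hi
          by_cases hij : i = j
          · subst hij
            have : (fail.set i (k+1)).getD i 0 = k+1 := by
              rw [List.getD_eq_getElem _ _ (by simpa [hlen] using hjlt)]
              simp [List.getElem_set_self]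
            rw [this]; exact hnewmax
          · have : (fail.set j (k+1)).getD i 0 = fail.getD i 0 := by
              simp [List.getD_eq_getElem?_getD, List.getElem?_set_ne (by omega : j ≠ i)]
            rw [this]; exact hdone i (by omega)
        · intro i hi him
          have : (fail.set j (k+1)).getD i 0 = fail.getD i 0 := by
            simp [List.getD_eq_getElem?_getD, List.getElem?_set_ne (by omega : j ≠ i)]
          rw [this]; exact hzero i (by omega) him
        · exact hnewb
        · intro hj2 b hb
          rcases Nat.eq_zero_or_pos b with rfl | hbpos
          · omega
          obtain ⟨b', rfl⟩ : ∃ b', b = b' + 1 := ⟨b - 1, by omega⟩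
          have hb'm : b' < p.length := by have := hb.1; omega
          have := (pvTake_suffix_succ_iff p p b' (j+1) hb'm hj2).mp hb.2
          have : b' ≤ k + 1 := hnewmax.2 b' ⟨by have := hb.1; omega, this.1⟩
          omega
        · omega
      · rw [if_neg hch]
        by_cases hk : 0 < k
        · rw [if_pos hk]
          have hmk : pvMaxB p k (fail.getD (k-1) 0) := by
            have := hdone (k-1) (by omega)
            rwa [Nat.sub_add_cancel hk] at this
          have hk'k : fail.getD (k-1) 0 < k := by have := hmk.1.1; omega
          apply ih f (by omega) j (fail.getD (k-1) 0) fail hj1 hjm hlen hdone hzero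
            (pvBord_trans hbord hmk.1)
          · intro hj2 b hb
            rcases Nat.eq_zero_or_pos b with rfl | hbpos
            · omega
            obtain ⟨b', rfl⟩ : ∃ b', b = b' + 1 := ⟨b - 1, by omega⟩
            have hb'm : b' < p.length := by have := hb.1; omega
            have hdec := (pvTake_suffix_succ_iff p p b' j hb'm hjlt).mp hb.2
            have hb'k : b' + 1 ≤ k + 1 := hmax hjlt _ hb
            have hb'ne : b' ≠ k := by
              intro h; subst h
              rw [List.getD_eq_getElem _ _ hjlt, List.getD_eq_getElem _ _ hkm] at hch
              exact hch (hdec.2.symm)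
            have : pvBord p k b' := pvBord_of_two_suffix hdec.1 hbord.2 (by omega) (by omega)
            have := hmk.2 b' this
            omega
          · omega
        · rw [if_neg hk]
          have hk0 : k = 0 := by omega
          subst hk0
          have hmax0 : pvMaxB p (j+1) 0 := by
            refine ⟨pvBord_zero p (j+1) (by omega), ?_⟩
            intro b hb
            rcases Nat.eq_zero_or_pos b with rfl | hbpos
            · omega
            obtain ⟨b', rfl⟩ : ∃ b', b = b' + 1 := ⟨b - 1, by omega⟩
            have hb'm : b' < p.length := by have := hb.1; omega
            have hdec := (pvTake_suffix_succ_iff p p b' j hb'm hjlt).mp hb.2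
            have : b' + 1 ≤ 1 := hmax hjlt _ hb
            have hb0 : b' = 0 := by omega
            subst hb0
            rw [List.getD_eq_getElem _ _ hjlt, List.getD_eq_getElem _ _ (by omega : 0 < p.length)] at hch
            exact absurd hdec.2.symm hch
          apply ih f (by omega) (j+1) 0 fail (by omega) (by omega) hlen
          · intro i hi
            by_cases hij : i = j
            · subst hij
              rw [hzero i (by omega) hjlt]
              exact hmax0
            · exact hdone i (by omega)
          · intro i hi him; exact hzero i (by omega) him
          · exact pvBord_zero p (j+1) (by omega)
          · intro hj2 b hb
            rcases Nat.eq_zero_or_pos b with rfl | hbpos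
            · omega
            obtain ⟨b', rfl⟩ : ∃ b', b = b' + 1 := ⟨b - 1, by omega⟩
            have hb'm : b' < p.length := by have := hb.1; omega
            have hdec := (pvTake_suffix_succ_iff p p b' (j+1) hb'm hj2).mp hb.2
            have : b' ≤ 0 := hmax0.2 b' ⟨by have := hb.1; omega, hdec.1⟩
            omega
          · omega
    · rw [if_neg hjlt]
      exact ⟨hlen, fun i hi => hdone i (by omega)⟩

lemma pvKmpFail_spec (p : List Char) (hm : 0 < p.length) : pvFailSpec p (pvKmpFail p) := by
  apply pvKmpFailAux p (2 * p.length) 1 0 (List.replicate p.length 0) (by omega) (by omega)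
    (by simp)
  · intro i hi
    have hi0 : i = 0 := by omega
    subst hi0
    have : (List.replicate p.length (0:Nat)).getD 0 0 = 0 := by
      rw [List.getD_eq_getElem _ _ (by simpa using hm)]
      simp
    rw [this]
    exact ⟨pvBord_zero p 1 (by omega), fun b hb => by have := hb.1; omega⟩
  · intro i hi him
    rw [List.getD_eq_getElem _ _ (by simpa using him)]
    simp
  · exact pvBord_zero p 1 (by omega)
  · intro h1 b hb
    have := hb.1; omega
  · omega

-- ---- block structure of the joined text ----

def pvF (c : Char) (us : List (List Char)) : List Char := us.flatMap (fun u => u ++ [c])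

-- the value A's counter gains at a separator, characterised without the failure table:
-- the number of nonempty (proper) prefixes of p that the processed text ends with
def pvCntU (p u : List Char) : Nat :=
  ((Finset.range p.length).filter (fun b => 0 < b ∧ p.take b <:+ u)).card

lemma pvCntU_take_zero (p : List Char) : pvCntU p (p.take 0) = 0 := by
  unfold pvCntU
  rw [Finset.card_eq_zero, Finset.filter_eq_empty_iff]
  intro b hb
  simp only [List.take_zero]
  rintro ⟨hb0, hsuf⟩
  have hnil := List.suffix_nil.mp hsuf
  have hlen := congrArg List.length hnil
  have hbm := Finset.mem_range.mp hb
  simp only [List.length_take, List.length_nil] at hlen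
  omega

lemma pvCntU_ne_zero_iff (p u : List Char) :
    pvCntU p u ≠ 0 ↔ ∃ b, 0 < b ∧ b < p.length ∧ p.take b <:+ u := by
  unfold pvCntU
  constructor
  · intro h
    obtain ⟨b, hb⟩ := Finset.card_pos.mp (Nat.pos_of_ne_zero h)
    simp only [Finset.mem_filter, Finset.mem_range] at hb
    exact ⟨b, hb.2.1, hb.1, hb.2.2⟩
  · rintro ⟨b, h1, h2, h3⟩
    exact (Finset.card_pos.mpr ⟨b, Finset.mem_filter.mpr ⟨Finset.mem_range.mpr h2, h1, h3⟩⟩).ne'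

-- one fallback step of the failure function removes exactly one prefix-suffix (the largest)
lemma pvECnt_step (p : List Char) (fail : List Nat) (hf : pvFailSpec p fail) (k : Nat)
    (hk : 0 < k) (hkm : k < p.length) :
    pvCntU p (p.take k) = pvCntU p (p.take (fail.getD (k-1) 0)) + 1 := by
  have hmk : pvMaxB p k (fail.getD (k-1) 0) := by
    have := hf.2 (k-1) (by omega)
    rwa [Nat.sub_add_cancel hk] at this
  have hk'k : fail.getD (k-1) 0 < k := by have := hmk.1.1; omega
  unfold pvCntU
  have hset : (Finset.range p.length).filter (fun b => 0 < b ∧ p.take b <:+ p.take k)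
      = insert k ((Finset.range p.length).filter
          (fun b => 0 < b ∧ p.take b <:+ p.take (fail.getD (k-1) 0))) := by
    ext b
    simp only [Finset.mem_insert, Finset.mem_filter, Finset.mem_range]
    constructor
    · rintro ⟨hbm, hb0, hsuf⟩
      by_cases hbk : b = k
      · exact Or.inl hbk
      · refine Or.inr ⟨hbm, hb0, ?_⟩
        have hble : b ≤ k := by
          have := hsuf.length_le
          simp only [List.length_take] at this
          omega
        have hblt : b < k := by omega
        rcases Nat.lt_or_ge b (fail.getD (k-1) 0) with h1 | h1
        · exact (pvBord_of_two_suffix hsuf hmk.1.2 h1 (by omega)).2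
        · have := hmk.2 b ⟨hblt, hsuf⟩
          have hbk' : b = fail.getD (k-1) 0 := by omega
          subst hbk'
          exact List.suffix_refl _
    · rintro (rfl | ⟨hbm, hb0, hsuf⟩)
      · exact ⟨hkm, hk, List.suffix_refl _⟩
      · exact ⟨hbm, hb0, hsuf.trans hmk.1.2⟩
  rw [hset, Finset.card_insert_of_notMem]
  intro hmem
  simp only [Finset.mem_filter, Finset.mem_range] at hmem
  have := hmem.2.2.length_le
  simp only [List.length_take] at this
  omega

-- at a maximal scanner state k, the chain count equals the direct prefix-suffix count of u
lemma pvECnt_eq_cntU (p u : List Char) (k : Nat) (hkm : k < p.length)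
    (hsuf : 0 < k → p.take k <:+ u)
    (hmax : ∀ b, b ≤ p.length → 1 ≤ b → p.take b <:+ u → b ≤ k) :
    pvCntU p (p.take k) = pvCntU p u := by
  unfold pvCntU
  congr 1
  ext b
  simp only [Finset.mem_filter, Finset.mem_range]
  constructor
  · rintro ⟨hbm, hb0, hs⟩
    refine ⟨hbm, hb0, ?_⟩
    rcases Nat.eq_zero_or_pos k with rfl | hk
    · exfalso
      rw [List.take_zero] at hs
      have hnil := List.suffix_nil.mp hs
      have hlen := congrArg List.length hnil
      simp only [List.length_take, List.length_nil] at hlen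
      omega
    · exact hs.trans (hsuf hk)
  · rintro ⟨hbm, hb0, hs⟩
    have hble : b ≤ k := hmax b (by omega) hb0 hs
    rcases Nat.eq_or_lt_of_le hble with rfl | hlt
    · exact ⟨hbm, hb0, List.suffix_refl _⟩
    · exact ⟨hbm, hb0, (pvBord_of_two_suffix hs (hsuf (by omega)) hlt (by omega)).2⟩

def pvSpecIdx2 (p : List Char) : List (List Char) → Nat → List Int
  | [], _ => []
  | u :: rest, t =>
    if p <:+: u then (t : Int) :: pvSpecIdx2 p rest (t + 1)
    else pvSpecIdx2 p rest (t + 1 + pvCntU p u)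

lemma pvSpecIdx2_nil_of_nomatch {p : List Char} {us : List (List Char)}
    (h : ∀ v ∈ us, ¬ p <:+: v) (tnum : Nat) : pvSpecIdx2 p us tnum = [] := by
  induction us generalizing tnum with
  | nil => rfl
  | cons u rest ih =>
    simp only [pvSpecIdx2, if_neg (h u (by simp))]
    exact ih (fun v hv => h v (by simp [hv])) _

-- ---- the scan lemmas ----

lemma pvGetD_block (pre u suf : List Char) (x : Char) (d : Nat) (hd : d < u.length) :
    (pre ++ u ++ suf).getD (pre.length + d) x = u[d] := by
  rw [List.append_assoc, List.getD_eq_getElem?_getD,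
      List.getElem?_append_right (by omega : pre.length ≤ pre.length + d)]
  simp only [Nat.add_sub_cancel_left]
  rw [List.getElem?_append_left hd, List.getElem?_eq_getElem hd]
  rfl

lemma pvSkipToSep_block (pre u suf : List Char) (c : Char) (hcu : c ∉ u) (d : Nat) (hd : d ≤ u.length) :
    ∀ fuel, fuel ≥ u.length - d + 1 →
    pvSkipToSep (pre ++ u ++ c :: suf) [c] fuel (pre.length + d) = pre.length + u.length + 1 := by
  have hassoc : pre ++ u ++ c :: suf = pre ++ (u ++ [c]) ++ suf := by simp
  have hlen : (pre ++ u ++ c :: suf).length = pre.length + u.length + 1 + suf.length := by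
    simp; omega
  intro fuel
  induction fuel using Nat.strong_induction_on generalizing d with
  | _ fuel ihf =>
    intro hfuel
    obtain ⟨f, rfl⟩ : ∃ f, fuel = f + 1 := ⟨fuel - 1, by omega⟩
    rw [pvSkipToSep, if_pos (by omega)]
    by_cases hdu : d < u.length
    · have hgd : (pre ++ u ++ c :: suf).getD (pre.length + d) ' ' = u[d] := by
        rw [hassoc]
        have := pvGetD_block pre (u ++ [c]) suf ' ' d (by simp; omega)
        simpa [List.getElem_append_left hdu] using this
      have hne : u[d] ≠ c := fun h => hcu (h ▸ List.getElem_mem hdu)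
      rw [hgd, if_neg (by simpa using hne)]
      rw [show pre.length + d + 1 = pre.length + (d+1) by omega]
      exact ihf f (by omega) (d+1) (by omega) (by omega)
    · have hdu' : d = u.length := by omega
      subst hdu'
      have hgd : (pre ++ u ++ c :: suf).getD (pre.length + u.length) ' ' = c := by
        rw [hassoc]
        have := pvGetD_block pre (u ++ [c]) suf ' ' u.length (by simp)
        simpa using this
      rw [hgd, if_pos rfl]

lemma pvSepCross (p : List Char) (c : Char) (fail : List Nat) (hm : 0 < p.length)
    (hc : c ∉ p) (hf : pvFailSpec p fail) (pre suf t : List Char) (ht : t = pre ++ c :: suf) :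
    ∀ fuel k tnum acc, k < p.length → fuel ≥ 2 * (t.length - pre.length) + k + 1 →
    ∃ f', f' ≥ 2 * (t.length - (pre.length + 1)) + 1 ∧
      pvMainLoop p t [c] fail p.length fuel pre.length k tnum acc
        = pvMainLoop p t [c] fail p.length f' (pre.length + 1) 0
            (tnum + 1 + pvCntU p (p.take k)) acc := by
  have hlen : t.length = pre.length + 1 + suf.length := by
    rw [ht]; simp only [List.length_append, List.length_cons]; omega
  intro fuel k
  induction k using Nat.strong_induction_on generalizing fuel with
  | _ k ihk =>
    intro tnum acc hkm hfuel
    obtain ⟨f, rfl⟩ : ∃ f, fuel = f + 1 := ⟨fuel - 1, by omega⟩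
    have hgd : t.getD pre.length ' ' = c := by
      rw [ht, show pre ++ c :: suf = pre ++ [c] ++ suf by simp]
      have := pvGetD_block pre [c] suf ' ' 0 (by simp)
      simpa using this
    have hnotp : ¬ t.getD pre.length ' ' = p.getD k ' ' := by
      rw [hgd, List.getD_eq_getElem _ _ hkm]
      exact fun h => hc (h ▸ List.getElem_mem hkm)
    rw [pvMainLoop, if_pos (by omega), if_neg hnotp]
    simp only [hgd, reduceIte]
    by_cases hk : 0 < k
    · rw [if_pos hk]
      have hlt : fail.getD (k-1) 0 < k := pvFailSpec_lt hf hk (by omega)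
      obtain ⟨f', hge, heq⟩ :=
        ihk (fail.getD (k-1) 0) hlt f (tnum + 1) acc (by omega) (by omega)
      refine ⟨f', hge, ?_⟩
      rw [heq, pvECnt_step p fail hf k hk hkm,
        show tnum + 1 + (pvCntU p (p.take (fail.getD (k-1) 0)) + 1)
            = tnum + 1 + 1 + pvCntU p (p.take (fail.getD (k-1) 0)) by omega]
    · rw [if_neg hk]
      have hk0 : k = 0 := by omega
      subst hk0
      rw [pvCntU_take_zero]
      exact ⟨f, by omega, rfl⟩

lemma pvBlockScan (p : List Char) (hm : 0 < p.length) (c : Char) (hc : c ∉ p) (fail : List Nat)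
    (hf : pvFailSpec p fail) (u : List Char) (hcu : c ∉ u) (pre suf t : List Char)
    (ht : t = pre ++ u ++ c :: suf) :
    ∀ fuel d k tnum acc, d ≤ u.length → k < p.length →
    p.take k <:+ u.take d →
    (∀ b, b ≤ p.length → 1 ≤ b → p.take b <:+ u.take (d+1) → b ≤ k + 1) →
    (d = u.length → ∀ b, b ≤ p.length → 1 ≤ b → p.take b <:+ u → b ≤ k) →
    (∀ e, e ≤ d → ¬ p <:+ u.take e) →
    fuel ≥ 2 * (t.length - (pre.length + d)) + k + 1 →
    ( (p <:+: u ∧ ∃ f', f' ≥ 2 * (t.length - (pre.length + u.length + 1)) + 1 ∧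
        pvMainLoop p t [c] fail p.length fuel (pre.length + d) k tnum acc
          = pvMainLoop p t [c] fail p.length f' (pre.length + u.length + 1) 0 (tnum + 1) (acc ++ [(tnum : Int)]))
      ∨ (¬ p <:+: u ∧ ∃ f' k', k' < p.length ∧ (0 < k' → p.take k' <:+ u) ∧
          (∀ b, b ≤ p.length → 1 ≤ b → p.take b <:+ u → b ≤ k') ∧
          f' ≥ 2 * (t.length - (pre.length + u.length)) + k' + 1 ∧
          pvMainLoop p t [c] fail p.length fuel (pre.length + d) k tnum acc
            = pvMainLoop p t [c] fail p.length f' (pre.length + u.length) k' tnum acc) ) := by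
  have hassoc : t = pre ++ (u ++ [c]) ++ suf := by simp [ht]
  have hT : t.length = pre.length + u.length + 1 + suf.length := by
    rw [ht]; simp only [List.length_append, List.length_cons]; omega
  intro fuel
  induction fuel using Nat.strong_induction_on with
  | _ fuel ihf =>
    intro d k tnum acc hd hkm hI1 hJ hI3e hI2 hfuel
    by_cases hdu : d < u.length
    · -- still inside the segment
      obtain ⟨f, rfl⟩ : ∃ f, fuel = f + 1 := ⟨fuel - 1, by omega⟩
      have hgd : t.getD (pre.length + d) ' ' = u[d] := by
        rw [hassoc]
        have := pvGetD_block pre (u ++ [c]) suf ' ' d (by simp; omega)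
        simpa [List.getElem_append_left hdu] using this
      have hne : u[d] ≠ c := fun h => hcu (h ▸ List.getElem_mem hdu)
      rw [pvMainLoop, if_pos (by omega)]
      simp only [hgd]
      rw [if_neg (show ¬([u[d]] = [c]) by simpa using hne)]
      by_cases hch : u[d] = p.getD k ' '
      · have hchar : p[k] = u[d] := by
          rw [List.getD_eq_getElem _ _ hkm] at hch; exact hch.symm
        rw [if_pos hch]
        by_cases hk1 : k = p.length - 1
        · -- full match ending at d
          rw [if_pos hk1]
          have hocc : p <:+ u.take (d+1) := by
            have := (pvTake_suffix_succ_iff p u k d hkm hdu).mpr ⟨hI1, hchar⟩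
            rwa [show k + 1 = p.length by omega, List.take_length] at this
          have hinf : p <:+: u := pvInfix_iff_suffix_take.mpr ⟨d+1, by omega, hocc⟩
          have hskip : pvSkipToSep t [c] t.length (pre.length + d) = pre.length + u.length + 1 := by
            have := pvSkipToSep_block pre u suf c hcu d (by omega) t.length (by omega)
            rwa [← ht] at this
          rw [hskip]
          exact Or.inl ⟨hinf, f, by omega, rfl⟩
        · -- partial match advances
          rw [if_neg hk1]
          have hk1m : k + 1 < p.length := by omega
          have hI1' : p.take (k+1) <:+ u.take (d+1) :=
            (pvTake_suffix_succ_iff p u k d hkm hdu).mpr ⟨hI1, hchar⟩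
          have hJ' : ∀ b, b ≤ p.length → 1 ≤ b → p.take b <:+ u.take (d+2) → b ≤ k + 2 := by
            intro b hb1 hb2 hsuf
            by_cases hdu1 : d + 1 < u.length
            · obtain ⟨b', rfl⟩ : ∃ b', b = b' + 1 := ⟨b - 1, by omega⟩
              rcases Nat.eq_zero_or_pos b' with rfl | hb'pos
              · omega
              have hb'm : b' < p.length := by omega
              have hdec := (pvTake_suffix_succ_iff p u b' (d+1) hb'm hdu1).mp hsuf
              have := hJ b' (by omega) (by omega) hdec.1
              omega
            · rw [List.take_of_length_le (show u.length ≤ d + 2 by omega)] at hsuf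
              have := hJ b hb1 hb2 (by rwa [List.take_of_length_le (show u.length ≤ d + 1 by omega)])
              omega
          have hI2' : ∀ e, e ≤ d + 1 → ¬ p <:+ u.take e := by
            intro e he hocc
            rcases Nat.lt_or_ge e (d+1) with he' | he'
            · exact hI2 e (by omega) hocc
            · have he'' : e = d + 1 := by omega
              subst he''
              have := hJ p.length (le_refl _) (by omega) (by rwa [List.take_length])
              omega
          have := ihf f (by omega) (d+1) (k+1) tnum acc (by omega) hk1m hI1' hJ'
            (by
              intro h b hb1 hb2 hsuf
              apply hJ b hb1 hb2
              rw [h, List.take_length]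
              exact hsuf)
            hI2' (by omega)
          rw [show pre.length + d + 1 = pre.length + (d+1) by omega]
          exact this
      · rw [if_neg hch]
        by_cases hk : 0 < k
        · -- failure-function fallback
          rw [if_pos hk]
          have hchne : p[k] ≠ u[d] := by
            rw [List.getD_eq_getElem _ _ hkm] at hch
            exact fun h => hch h.symm
          have hmk : pvMaxB p k (fail.getD (k-1) 0) := by
            have := hf.2 (k-1) (by omega)
            rwa [Nat.sub_add_cancel hk] at this
          have hk'k : fail.getD (k-1) 0 < k := by have := hmk.1.1; omega
          have hI1' : p.take (fail.getD (k-1) 0) <:+ u.take d :=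
            List.IsSuffix.trans hmk.1.2 hI1
          have hJ' : ∀ b, b ≤ p.length → 1 ≤ b → p.take b <:+ u.take (d+1) →
              b ≤ fail.getD (k-1) 0 + 1 := by
            intro b hb1 hb2 hsuf
            obtain ⟨b', rfl⟩ : ∃ b', b = b' + 1 := ⟨b - 1, by omega⟩
            rcases Nat.eq_zero_or_pos b' with rfl | hb'pos
            · omega
            have hb'm : b' < p.length := by omega
            have hdec := (pvTake_suffix_succ_iff p u b' d hb'm hdu).mp hsuf
            have hb'k : b' + 1 ≤ k + 1 := hJ (b'+1) hb1 hb2 hsuf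
            have hb'ne : b' ≠ k := fun h => hchne (by subst h; exact hdec.2)
            have hbord : pvBord p k b' := pvBord_of_two_suffix hdec.1 hI1 (by omega) (by omega)
            have := hmk.2 b' hbord
            omega
          exact ihf f (by omega) d (fail.getD (k-1) 0) tnum acc hd (by omega) hI1' hJ'
            (fun h => absurd h (by omega)) hI2 (by omega)
        · -- mismatch with k = 0: advance
          rw [if_neg hk]
          have hk0 : k = 0 := by omega
          subst hk0
          have hch0 : p[0] ≠ u[d] := by
            rw [List.getD_eq_getElem _ _ hm] at hch
            exact fun h => hch h.symm
          have hstep1 : ∀ b, 1 ≤ b → b ≤ p.length → ¬ p.take b <:+ u.take (d+1) := by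
            intro b hb1 hb2 hsuf
            have hble : b ≤ 1 := hJ b hb2 hb1 hsuf
            have hb1' : b = 1 := by omega
            subst hb1'
            have hdec := (pvTake_suffix_succ_iff p u 0 d hm hdu).mp (by simpa using hsuf)
            exact hch0 hdec.2
          have hJ' : ∀ b, b ≤ p.length → 1 ≤ b → p.take b <:+ u.take (d+2) → b ≤ 0 + 1 := by
            intro b hb1 hb2 hsuf
            by_cases hdu1 : d + 1 < u.length
            · obtain ⟨b', rfl⟩ : ∃ b', b = b' + 1 := ⟨b - 1, by omega⟩
              rcases Nat.eq_zero_or_pos b' with rfl | hb'pos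
              · omega
              have hb'm : b' < p.length := by omega
              have hdec := (pvTake_suffix_succ_iff p u b' (d+1) hb'm hdu1).mp hsuf
              exact absurd hdec.1 (hstep1 b' hb'pos (by omega))
            · rw [List.take_of_length_le (show u.length ≤ d + 2 by omega)] at hsuf
              exact absurd (by rwa [List.take_of_length_le (show u.length ≤ d + 1 by omega)]) (hstep1 b hb2 hb1)
          have hI2' : ∀ e, e ≤ d + 1 → ¬ p <:+ u.take e := by
            intro e he hocc
            rcases Nat.lt_or_ge e (d+1) with he' | he'
            · exact hI2 e (by omega) hocc
            · have he'' : e = d + 1 := by omega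
              subst he''
              exact hstep1 p.length (by omega) (le_refl _) (by rwa [List.take_length])
          have := ihf f (by omega) (d+1) 0 tnum acc (by omega) hm (by simp) hJ'
            (by
              intro h b hb1 hb2 hsuf
              exfalso
              apply hstep1 b hb2 hb1
              rw [h, List.take_length]
              exact hsuf)
            hI2' (by omega)
          rw [show pre.length + d + 1 = pre.length + (d+1) by omega]
          exact this
    · -- d = u.length: at the separator
      have hdu' : d = u.length := by omega
      subst hdu'
      have hnoinf : ¬ p <:+: u := by
        intro hinf
        obtain ⟨e, he, hocc⟩ := pvInfix_iff_suffix_take.mp hinf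
        exact hI2 e he hocc
      refine Or.inr ⟨hnoinf, fuel, k, hkm, ?_, hI3e rfl, by omega, rfl⟩
      intro hk
      rw [List.take_length] at hI1
      exact hI1

lemma pvScanSegs (p : List Char) (hm : 0 < p.length) (c : Char) (hc : c ∉ p) (fail : List Nat)
    (hf : pvFailSpec p fail) :
    ∀ (us : List (List Char)), (∀ u ∈ us, c ∉ u) →
    ∀ (pre t : List Char), t = pre ++ pvF c us →
    ∀ fuel tnum acc, fuel ≥ 2 * (t.length - pre.length) + 1 →
    pvMainLoop p t [c] fail p.length fuel pre.length 0 tnum acc = acc ++ pvSpecIdx2 p us tnum := by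
  intro us
  induction us with
  | nil =>
    intro _ pre t ht fuel tnum acc hfuel
    obtain ⟨f, rfl⟩ : ∃ f, fuel = f + 1 := ⟨fuel - 1, by omega⟩
    rw [pvMainLoop, if_neg (by simp [ht, pvF]), pvSpecIdx2, List.append_nil]
  | cons u rest ih =>
    intro h1 pre t ht fuel tnum acc hfuel
    have ht' : t = pre ++ u ++ c :: pvF c rest := by simp [ht, pvF]
    have hT : t.length = pre.length + (u.length + 1 + (pvF c rest).length) := by
      rw [ht']; simp only [List.length_append, List.length_cons]; omega
    have hres := pvBlockScan p hm c hc fail hf u (h1 u (by simp)) pre (pvF c rest) t ht'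
      fuel 0 0 tnum acc (by omega) hm (by simp)
      (by
        intro b hb1 hb2 hsuf
        have := hsuf.length_le
        simp only [List.length_take] at this
        omega)
      (by
        intro h b hb1 hb2 hsuf
        have hu : u = [] := List.length_eq_zero_iff.mp h.symm
        subst hu
        have hnil := List.suffix_nil.mp hsuf
        have hlen2 := congrArg List.length hnil
        simp only [List.length_take, List.length_nil] at hlen2
        omega)
      (by
        intro e he hocc
        have he0 : e = 0 := by omega
        subst he0
        simp only [List.take_zero] at hocc
        rw [List.suffix_nil] at hocc
        rw [hocc] at hm
        simp at hm)
      (by omega)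
    rcases hres with ⟨hinf, f', hge', heq⟩ | ⟨hninf, f', k', hk'm, hk'u, hk'max, hfb, heq⟩
    · -- the segment contains the pattern: its index is recorded, counter steps by one
      rw [show pre.length + 0 = pre.length by omega] at heq
      rw [heq]
      have := ih (fun v hv => h1 v (by simp [hv]))
        (pre ++ u ++ [c]) t (by simp [ht', pvF]) f' (tnum + 1) (acc ++ [(tnum : Int)])
        (by simp only [List.length_append, List.length_cons]; omega)
      rw [show pre.length + u.length + 1 = (pre ++ u ++ [c]).length by simp only [List.length_append, List.length_cons, List.length_nil]]
      rw [this, pvSpecIdx2, if_pos hinf]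
      simp
    · -- no match: the counter advances by 1 plus the number of pattern-prefixes u ends with
      rw [show pre.length + 0 = pre.length by omega] at heq
      rw [heq]
      obtain ⟨f'', hge'', heq2⟩ := pvSepCross p c fail hm hc hf (pre ++ u) (pvF c rest) t
        (by simpa using ht') f' k' tnum acc hk'm (by simp only [List.length_append]; omega)
      rw [show (pre ++ u).length = pre.length + u.length by simp] at heq2 hge''
      rw [heq2, pvECnt_eq_cntU p u k' hk'm hk'u hk'max]
      have := ih (fun v hv => h1 v (by simp [hv]))
        (pre ++ u ++ [c]) t (by simp [ht', pvF]) f'' (tnum + 1 + pvCntU p u) acc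
        (by simp only [List.length_append, List.length_cons]; omega)
      rw [show pre.length + u.length + 1 = (pre ++ u ++ [c]).length by simp only [List.length_append, List.length_cons, List.length_nil]]
      rw [this, pvSpecIdx2, if_neg hninf]

-- ---- scanning text in which the pattern does not occur at all (any sep) ----

lemma pvScanNoOcc (p : List Char) (hm : 0 < p.length) (sl : List Char) (fail : List Nat)
    (hf : pvFailSpec p fail) (t : List Char)
    (hno : ∀ e, e ≤ t.length → ¬ p <:+ t.take e) :
    ∀ fuel d k tnum acc, d ≤ t.length → k < p.length →
    p.take k <:+ t.take d →
    (∀ b, b ≤ p.length → 1 ≤ b → p.take b <:+ t.take (d+1) → b ≤ k + 1) →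
    pvMainLoop p t sl fail p.length fuel d k tnum acc = acc := by
  intro fuel
  induction fuel using Nat.strong_induction_on with
  | _ fuel ihf =>
    intro d k tnum acc hd hkm hI1 hJ
    match fuel with
    | 0 => rfl
    | f + 1 =>
    by_cases hdu : d < t.length
    · have hgd : t.getD d ' ' = t[d] := List.getD_eq_getElem _ _ hdu
      rw [pvMainLoop, if_pos hdu]
      simp only [hgd]
      by_cases hch : t[d] = p.getD k ' '
      · have hchar : p[k] = t[d] := by
          rw [List.getD_eq_getElem _ _ hkm] at hch; exact hch.symm
        rw [if_pos hch]
        by_cases hk1 : k = p.length - 1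
        · exfalso
          have hocc : p <:+ t.take (d+1) := by
            have := (pvTake_suffix_succ_iff p t k d hkm hdu).mpr ⟨hI1, hchar⟩
            rwa [show k + 1 = p.length by omega, List.take_length] at this
          exact hno (d+1) (by omega) hocc
        · rw [if_neg hk1]
          have hk1m : k + 1 < p.length := by omega
          have hI1' : p.take (k+1) <:+ t.take (d+1) :=
            (pvTake_suffix_succ_iff p t k d hkm hdu).mpr ⟨hI1, hchar⟩
          have hJ' : ∀ b, b ≤ p.length → 1 ≤ b → p.take b <:+ t.take (d+2) → b ≤ k + 2 := by
            intro b hb1 hb2 hsuf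
            by_cases hdu1 : d + 1 < t.length
            · obtain ⟨b', rfl⟩ : ∃ b', b = b' + 1 := ⟨b - 1, by omega⟩
              rcases Nat.eq_zero_or_pos b' with rfl | hb'pos
              · omega
              have hb'm : b' < p.length := by omega
              have hdec := (pvTake_suffix_succ_iff p t b' (d+1) hb'm hdu1).mp hsuf
              have := hJ b' (by omega) (by omega) hdec.1
              omega
            · rw [List.take_of_length_le (show t.length ≤ d + 2 by omega)] at hsuf
              have := hJ b hb1 hb2 (by rwa [List.take_of_length_le (show t.length ≤ d + 1 by omega)])
              omega
          exact ihf f (by omega) (d+1) (k+1) _ acc (by omega) hk1m hI1' hJ'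
      · rw [if_neg hch]
        by_cases hk : 0 < k
        · rw [if_pos hk]
          have hchne : p[k] ≠ t[d] := by
            rw [List.getD_eq_getElem _ _ hkm] at hch
            exact fun h => hch h.symm
          have hmk : pvMaxB p k (fail.getD (k-1) 0) := by
            have := hf.2 (k-1) (by omega)
            rwa [Nat.sub_add_cancel hk] at this
          have hk'k : fail.getD (k-1) 0 < k := by have := hmk.1.1; omega
          have hI1' : p.take (fail.getD (k-1) 0) <:+ t.take d :=
            List.IsSuffix.trans hmk.1.2 hI1
          have hJ' : ∀ b, b ≤ p.length → 1 ≤ b → p.take b <:+ t.take (d+1) →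
              b ≤ fail.getD (k-1) 0 + 1 := by
            intro b hb1 hb2 hsuf
            obtain ⟨b', rfl⟩ : ∃ b', b = b' + 1 := ⟨b - 1, by omega⟩
            rcases Nat.eq_zero_or_pos b' with rfl | hb'pos
            · omega
            have hb'm : b' < p.length := by omega
            have hdec := (pvTake_suffix_succ_iff p t b' d hb'm hdu).mp hsuf
            have hb'k : b' + 1 ≤ k + 1 := hJ (b'+1) hb1 hb2 hsuf
            have hb'ne : b' ≠ k := fun h => hchne (by subst h; exact hdec.2)
            have hbord : pvBord p k b' := pvBord_of_two_suffix hdec.1 hI1 (by omega) (by omega)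
            have := hmk.2 b' hbord
            omega
          exact ihf f (by omega) d (fail.getD (k-1) 0) _ acc hd (by omega) hI1' hJ'
        · rw [if_neg hk]
          have hk0 : k = 0 := by omega
          subst hk0
          have hch0 : p[0] ≠ t[d] := by
            rw [List.getD_eq_getElem _ _ hm] at hch
            exact fun h => hch h.symm
          have hstep1 : ∀ b, 1 ≤ b → b ≤ p.length → ¬ p.take b <:+ t.take (d+1) := by
            intro b hb1 hb2 hsuf
            have hble : b ≤ 1 := hJ b hb2 hb1 hsuf
            have hb1' : b = 1 := by omega
            subst hb1'
            have hdec := (pvTake_suffix_succ_iff p t 0 d hm hdu).mp (by simpa using hsuf)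
            exact hch0 hdec.2
          have hJ' : ∀ b, b ≤ p.length → 1 ≤ b → p.take b <:+ t.take (d+2) → b ≤ 0 + 1 := by
            intro b hb1 hb2 hsuf
            by_cases hdu1 : d + 1 < t.length
            · obtain ⟨b', rfl⟩ : ∃ b', b = b' + 1 := ⟨b - 1, by omega⟩
              rcases Nat.eq_zero_or_pos b' with rfl | hb'pos
              · omega
              have hb'm : b' < p.length := by omega
              have hdec := (pvTake_suffix_succ_iff p t b' (d+1) hb'm hdu1).mp hsuf
              exact absurd hdec.1 (hstep1 b' hb'pos (by omega))
            · rw [List.take_of_length_le (show t.length ≤ d + 2 by omega)] at hsuf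
              exact absurd (by rwa [List.take_of_length_le (show t.length ≤ d + 1 by omega)])
                (hstep1 b hb2 hb1)
          exact ihf f (by omega) (d+1) 0 _ acc (by omega) hm (by simp) hJ'
    · rw [pvMainLoop, if_neg hdu]

lemma pvMem_infix_join (sep : List Char) : ∀ (us : List (List Char)) (v : List Char), v ∈ us →
    v <:+: PySem.Chars.join sep us ++ sep := by
  intro us
  induction us with
  | nil => intro v hv; simp at hv
  | cons u rest ih =>
    intro v hv
    rcases List.mem_cons.mp hv with rfl | hv'
    · cases rest with
      | nil =>
        rw [PySem.Chars.join_singleton]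
        exact (List.prefix_append v sep).isInfix
      | cons r rs =>
        rw [PySem.Chars.join_cons_cons]
        exact ((List.prefix_append v (sep ++ PySem.Chars.join sep (r :: rs))).isInfix).trans
          (by simpa using (List.prefix_append (v ++ sep ++ PySem.Chars.join sep (r :: rs)) sep).isInfix)
    · have hrest : rest ≠ [] := by intro h; subst h; simp at hv'
      obtain ⟨r, rs, rfl⟩ := List.exists_cons_of_ne_nil hrest
      have := ih v hv'
      rw [PySem.Chars.join_cons_cons]
      refine this.trans ⟨u ++ sep, [], by simp⟩

lemma pvJoin_eq_F (c : Char) (us : List (List Char)) (h : us ≠ []) :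
    PySem.Chars.join [c] us ++ [c] = pvF c us := by
  induction us with
  | nil => exact absurd rfl h
  | cons u rest ih =>
    cases rest with
    | nil => simp [PySem.Chars.join_singleton, pvF]
    | cons v rest' =>
      rw [PySem.Chars.join_cons_cons]
      have := ih (by simp)
      simp only [pvF, List.flatMap_cons] at this ⊢
      rw [← this]
      simp

-- ---- A under the documented contract computes pvSpecIdx2 ----

lemma pvA_eq_specIdx2 (pattern : String) (texts : List String) (sep : String)
    (hm0 : ¬ pattern.toList.length = 0) (c : Char) (hc : sep.toList = [c])
    (hcp : c ∉ pattern.toList) (hct : ∀ t ∈ texts, c ∉ t.toList) :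
    find_all_from_list pattern texts sep = pvSpecIdx2 pattern.toList (texts.map String.toList) 0 := by
  have hm : 0 < pattern.toList.length := by omega
  have hfsp := pvKmpFail_spec pattern.toList hm
  rw [show find_all_from_list pattern texts sep
        = pvMainLoop pattern.toList
            (PySem.Chars.join sep.toList (texts.map String.toList) ++ sep.toList)
            sep.toList (pvKmpFail pattern.toList) pattern.toList.length
            (2 * (PySem.Chars.join sep.toList (texts.map String.toList) ++ sep.toList).length
              + pattern.toList.length + 1) 0 0 0 [] by
      simp only [find_all_from_list]; exact if_neg hm0]
  rw [hc]
  by_cases hts : texts = []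
  · subst hts
    rw [show PySem.Chars.join [c] (([] : List String).map String.toList) ++ [c] = [c] by
      simp [PySem.Chars.join_nil]]
    obtain ⟨f', hge, heq⟩ := pvSepCross pattern.toList c (pvKmpFail pattern.toList) hm
      hcp hfsp [] [] [c] (by simp)
      (2 * [c].length + pattern.toList.length + 1) 0 0 [] hm (by simp)
    simp only [List.length_nil] at heq
    rw [heq]
    obtain ⟨f'', rfl⟩ : ∃ f'', f' = f'' + 1 := ⟨f' - 1, by simp at hge; omega⟩
    rw [pvMainLoop, if_neg (by simp)]
    rfl
  · have husne : texts.map String.toList ≠ [] := by simpa using hts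
    rw [pvJoin_eq_F c (texts.map String.toList) husne]
    have := pvScanSegs pattern.toList hm c hcp (pvKmpFail pattern.toList) hfsp
      (texts.map String.toList)
      (by
        intro u hu
        obtain ⟨t0, ht0, rfl⟩ := List.mem_map.mp hu
        exact hct t0 ht0)
      [] (pvF c (texts.map String.toList)) (by simp)
      (2 * (pvF c (texts.map String.toList)).length + pattern.toList.length + 1) 0 []
      (by omega)
    simpa using this

-- ---- B computes the natural index list ----

def pvIdxNat (p : List Char) : List (List Char) → Int → List Int
  | [], _ => []
  | u :: rest, t =>
    if p <:+: u then t :: pvIdxNat p rest (t + 1) else pvIdxNat p rest (t + 1)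

lemma pvAlt_eq_idxNat_aux (p : List Char) : ∀ (ts : List String) (s : Int),
    ((PySem.List.enumerate ts s).filter (fun iu => PySem.Chars.isIn p iu.2.toList)).map (fun iu => iu.1)
      = pvIdxNat p (ts.map String.toList) s := by
  intro ts
  induction ts with
  | nil => intro s; simp [PySem.List.enumerate_nil, pvIdxNat]
  | cons u rest ih =>
    intro s
    rw [PySem.List.enumerate_cons]
    by_cases h : PySem.Chars.isIn p u.toList = true
    · have hinf : p <:+: u.toList := (PySem.Chars.isIn_iff_infix _ _).mp h
      rw [List.filter_cons]
      simp only [h, if_true, List.map_cons, pvIdxNat]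
      rw [if_pos hinf, ih (s+1)]
    · have hinf : ¬ p <:+: u.toList := fun hh => h ((PySem.Chars.isIn_iff_infix _ _).mpr hh)
      rw [List.filter_cons]
      simp only [h, Bool.false_eq_true, List.map_cons, pvIdxNat]
      rw [if_neg hinf]
      exact ih (s+1)

lemma pvAlt_eq_idxNat (pattern : String) (texts : List String) (sep : String) :
    find_all_from_list_alt pattern texts sep
      = pvIdxNat pattern.toList (texts.map String.toList) 0 := by
  simp only [find_all_from_list_alt]
  exact pvAlt_eq_idxNat_aux pattern.toList texts 0

lemma pvIdxNat_nil_of_nomatch {p : List Char} {us : List (List Char)}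
    (h : ∀ v ∈ us, ¬ p <:+: v) (t : Int) : pvIdxNat p us t = [] := by
  induction us generalizing t with
  | nil => rfl
  | cons u rest ih =>
    simp only [pvIdxNat, if_neg (h u (by simp))]
    exact ih (fun v hv => h v (by simp [hv])) _

-- ---- bridging D_ to the segment lists ----

def pvBadP (p u : List Char) : Prop :=
  ¬ p <:+: u ∧ ∃ b, 0 < b ∧ b < p.length ∧ p.take b <:+ u

lemma pvOccB_iff (p : List Char) : ∀ t : List Char, pvOccB p t = true ↔ p <:+: t := by
  intro t
  induction t with
  | nil => simp [pvOccB, List.isEmpty_iff]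
  | cons c rest ih =>
    rw [show pvOccB p (c :: rest) = (p.isPrefixOf (c :: rest) || pvOccB p rest) from rfl,
      Bool.or_eq_true, List.isPrefixOf_iff_prefix, ih, List.infix_cons_iff]

lemma pvGetD_map_toList (ts : List String) (k : Nat) :
    (ts.map String.toList).getD k [] = (ts.getD k "").toList := by
  induction ts generalizing k with
  | nil => cases k <;> simp
  | cons u rest ih =>
    cases k with
    | zero => simp
    | succ n => simp only [List.map_cons, List.getD_cons_succ]; exact ih n

lemma pvBadB_iff (p u : List Char) : pvBadB p u = true ↔ pvBadP p u := by
  unfold pvBadB pvBadP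
  rw [Bool.and_eq_true, Bool.not_eq_true', PySem.Chars.isIn_eq_false_iff, List.any_eq_true]
  simp only [List.mem_range, Bool.and_eq_true, decide_eq_true_eq]
  constructor
  · rintro ⟨h1, d, hd, hpre, hlt⟩
    refine ⟨h1, u.length - d, by omega, by simpa using hlt, ?_⟩
    have hdr : u.drop d = p.take ((u.drop d).length) := List.prefix_iff_eq_take.mp hpre
    rw [List.length_drop] at hdr
    rw [← hdr]
    exact List.drop_suffix d u
  · rintro ⟨h1, b, hb0, hbm, hsuf⟩
    have hlen : (p.take b).length = b := by
      rw [List.length_take]; omega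
    have hble : b ≤ u.length := by
      have := hsuf.length_le; omega
    refine ⟨h1, u.length - b, by omega, ?_, by omega⟩
    have hds : p.take b = u.drop (u.length - (p.take b).length) :=
      List.suffix_iff_eq_drop.mp hsuf
    rw [hlen] at hds
    rw [← hds]
    exact List.take_prefix b p

lemma pvShifted_iff (p : List Char) : ∀ (us : List (List Char)) (seen : Bool),
    pvShifted p us seen = true ↔
      ∃ j, j < us.length ∧ p <:+: us.getD j [] ∧
        (seen = true ∨ ∃ i, i < j ∧ pvBadP p (us.getD i [])) := by
  intro us
  induction us with
  | nil =>
    intro seen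
    simp [pvShifted]
  | cons u rest ih =>
    intro seen
    rw [show pvShifted p (u :: rest) seen
        = ((seen && PySem.Chars.isIn p u) || pvShifted p rest (seen || pvBadB p u)) from rfl]
    rw [Bool.or_eq_true, Bool.and_eq_true, ih (seen || pvBadB p u)]
    constructor
    · rintro (⟨hseen, hin⟩ | ⟨j, hj, hmj, hrest⟩)
      · exact ⟨0, by simp, by simpa using (PySem.Chars.isIn_iff_infix _ _).mp hin, Or.inl hseen⟩
      · refine ⟨j + 1, by simpa using Nat.succ_lt_succ hj, by simpa using hmj, ?_⟩
        rcases hrest with hsb | ⟨i, hij, hbad⟩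
        · rcases Bool.or_eq_true .. |>.mp hsb with hs | hb
          · exact Or.inl hs
          · exact Or.inr ⟨0, by omega, by simpa using (pvBadB_iff p u).mp hb⟩
        · exact Or.inr ⟨i + 1, by omega, by simpa using hbad⟩
    · rintro ⟨j, hj, hmj, hcase⟩
      cases j with
      | zero =>
        rcases hcase with hs | ⟨i, hi, _⟩
        · exact Or.inl ⟨hs, (PySem.Chars.isIn_iff_infix _ _).mpr (by simpa using hmj)⟩
        · omega
      | succ j' =>
        refine Or.inr ⟨j', by simpa using hj, by simpa using hmj, ?_⟩
        rcases hcase with hs | ⟨i, hi, hbad⟩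
        · exact Or.inl (by simp [hs])
        · cases i with
          | zero =>
            exact Or.inl (by simp [(pvBadB_iff p u).mpr (by simpa using hbad)])
          | succ i' =>
            exact Or.inr ⟨i', by omega, by simpa using hbad⟩

lemma pvD_iff (pattern : String) (texts : List String) (sep : String) :
    D_find_all_from_list pattern texts sep ↔
      ∃ j, j < texts.length ∧ pattern.toList <:+: (texts.getD j "").toList ∧
        ∃ i, i < j ∧ pvBadP pattern.toList (texts.getD i "").toList := by
  unfold D_find_all_from_list
  rw [pvShifted_iff]
  constructor
  · rintro ⟨j, hj, hmj, hcase⟩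
    rcases hcase with hs | ⟨i, hi, hbad⟩
    · exact absurd hs (by simp)
    · refine ⟨j, by simpa using hj, ?_, i, hi, ?_⟩
      · rw [show (texts.map (fun t => t.toList)) = texts.map String.toList from rfl,
          pvGetD_map_toList] at hmj
        exact hmj
      · rw [show (texts.map (fun t => t.toList)) = texts.map String.toList from rfl,
          pvGetD_map_toList] at hbad
        exact hbad
  · rintro ⟨j, hj, hmj, i, hi, hbad⟩
    refine ⟨j, by simpa using hj, ?_, Or.inr ⟨i, hi, ?_⟩⟩
    · rw [show (texts.map (fun t => t.toList)) = texts.map String.toList from rfl,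
        pvGetD_map_toList]
      exact hmj
    · rw [show (texts.map (fun t => t.toList)) = texts.map String.toList from rfl,
        pvGetD_map_toList]
      exact hbad

lemma pvExists_getD_of_mem {v : List Char} {L : List (List Char)} (h : v ∈ L) :
    ∃ k, k < L.length ∧ L.getD k [] = v := by
  obtain ⟨k, hk, rfl⟩ := List.getElem_of_mem h
  exact ⟨k, hk, List.getD_eq_getElem _ _ hk⟩

lemma pvMem_of_getD {L : List (List Char)} {k : Nat} (hk : k < L.length) :
    L.getD k [] ∈ L := by
  rw [List.getD_eq_getElem _ _ hk]
  exact List.getElem_mem hk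

-- structural form of ¬ D_: after a "bad" segment (no match, ends in a pattern prefix) no match follows
def pvNoBadBeforeMatch (p : List Char) : List (List Char) → Prop
  | [] => True
  | u :: rest => (pvBadP p u → ∀ v ∈ rest, ¬ p <:+: v) ∧ pvNoBadBeforeMatch p rest

lemma pvNoBad_of_indices (p : List Char) : ∀ (ts : List String),
    (∀ j, j < ts.length → p <:+: (ts.getD j "").toList →
      ∀ i, i < j → ¬ pvBadP p (ts.getD i "").toList) →
    pvNoBadBeforeMatch p (ts.map String.toList) := by
  intro ts
  induction ts with
  | nil => intro _; trivial
  | cons u rest ih =>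
    intro h
    refine ⟨?_, ih ?_⟩
    · intro hbad v hv hinf
      obtain ⟨k, hk, hkv⟩ := pvExists_getD_of_mem hv
      rw [List.length_map] at hk
      rw [pvGetD_map_toList] at hkv
      refine h (k+1) (by simp; omega) ?_ 0 (by omega) (by simpa using hbad)
      rw [List.getD_cons_succ, hkv]
      exact hinf
    · intro j hj hm i hi
      exact h (j+1) (by simp; omega) (by simpa using hm) (i+1) (by omega)

-- outside D_, A's scan result is the natural index list
lemma pvSpec_eq_nat (p : List Char) : ∀ (us : List (List Char)),
    pvNoBadBeforeMatch p us → ∀ t : Nat, pvSpecIdx2 p us t = pvIdxNat p us (t : Int) := by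
  intro us
  induction us with
  | nil => intro _ t; rfl
  | cons u rest ih =>
    rintro ⟨hhead, htail⟩ t
    by_cases hm : p <:+: u
    · simp only [pvSpecIdx2, pvIdxNat, if_pos hm]
      rw [ih htail (t+1)]
      push_cast
      ring_nf
    · by_cases hc : pvCntU p u = 0
      · simp only [pvSpecIdx2, pvIdxNat, if_neg hm, hc]
        rw [show t + 1 + 0 = t + 1 from rfl, ih htail (t+1)]
        push_cast
        ring_nf
      · have hbad : pvBadP p u := ⟨hm, (pvCntU_ne_zero_iff p u).mp hc⟩
        have hnom := hhead hbad
        simp only [pvSpecIdx2, pvIdxNat, if_neg hm]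
        rw [pvSpecIdx2_nil_of_nomatch hnom, pvIdxNat_nil_of_nomatch hnom]

-- inside D_, A's scan result differs from the natural index list: first, an offset counter
-- stays visible at the next recorded match
lemma pvL1 (p : List Char) : ∀ (us : List (List Char)) (s : Nat) (t : Int),
    t < (s : Int) → (∃ v ∈ us, p <:+: v) → pvSpecIdx2 p us s ≠ pvIdxNat p us t := by
  intro us
  induction us with
  | nil => rintro s t _ ⟨v, hv, _⟩; simp at hv
  | cons u rest ih =>
    rintro s t hlt ⟨v, hv, hinf⟩
    by_cases hm : p <:+: u
    · simp only [pvSpecIdx2, pvIdxNat, if_pos hm]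
      intro h
      injection h with h1 _
      omega
    · have hvres : v ∈ rest := by
        rcases List.mem_cons.mp hv with rfl | h
        · exact absurd hinf hm
        · exact h
      simp only [pvSpecIdx2, pvIdxNat, if_neg hm]
      exact ih (s + 1 + pvCntU p u) (t + 1) (by push_cast; omega) ⟨v, hvres, hinf⟩

lemma pvL2 (p : List Char) : ∀ (us : List (List Char)) (s : Nat),
    (∃ j, j < us.length ∧ p <:+: us.getD j [] ∧ ∃ i, i < j ∧ pvBadP p (us.getD i [])) →
    pvSpecIdx2 p us s ≠ pvIdxNat p us (s : Int) := by
  intro us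
  induction us with
  | nil => rintro s ⟨j, hj, _⟩; simp at hj
  | cons u rest ih =>
    rintro s ⟨j, hj, hmj, i, hij, hbadi⟩
    obtain ⟨j', rfl⟩ : ∃ j', j = j' + 1 := ⟨j - 1, by omega⟩
    have hj' : j' < rest.length := by simpa using hj
    have hmj' : p <:+: rest.getD j' [] := by simpa using hmj
    have hmv : ∃ v ∈ rest, p <:+: v := ⟨rest.getD j' [], pvMem_of_getD hj', hmj'⟩
    rcases Nat.eq_zero_or_pos i with rfl | hi0
    · have hbu : pvBadP p u := by simpa using hbadi
      have hcz : pvCntU p u ≠ 0 := (pvCntU_ne_zero_iff p u).mpr hbu.2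
      simp only [pvSpecIdx2, pvIdxNat, if_neg hbu.1]
      exact pvL1 p rest (s + 1 + pvCntU p u) ((s : Int) + 1) (by push_cast; omega) hmv
    · obtain ⟨i', rfl⟩ : ∃ i', i = i' + 1 := ⟨i - 1, by omega⟩
      have hbadi' : pvBadP p (rest.getD i' []) := by simpa using hbadi
      have hcond : ∃ j, j < rest.length ∧ p <:+: rest.getD j [] ∧
          ∃ i, i < j ∧ pvBadP p (rest.getD i []) :=
        ⟨j', hj', hmj', i', by omega, hbadi'⟩
      have hcast : ((s + 1 : Nat) : Int) = (s : Int) + 1 := by push_cast; ring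
      by_cases hm : p <:+: u
      · simp only [pvSpecIdx2, pvIdxNat, if_pos hm]
        intro h
        injection h with _ h2
        exact ih (s + 1) hcond (by rwa [hcast])
      · by_cases hc : pvCntU p u = 0
        · simp only [pvSpecIdx2, pvIdxNat, if_neg hm, hc]
          rw [show s + 1 + 0 = s + 1 from rfl]
          intro h
          exact ih (s + 1) hcond (by rwa [hcast])
        · simp only [pvSpecIdx2, pvIdxNat, if_neg hm]
          exact pvL1 p rest (s + 1 + pvCntU p u) ((s : Int) + 1) (by push_cast; omega) hmv

-- ===== VERDICT (by name: the statements are the Claim_ definitions above) =====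
theorem find_all_from_list_spec : Claim_unchanged_find_all_from_list := by
  intro pattern texts sep hdom hpre hnd
  show find_all_from_list pattern texts sep = find_all_from_list_alt pattern texts sep
  by_cases hm0 : pattern.toList.length = 0
  · have hp : pattern.toList = [] := List.length_eq_zero_iff.mp hm0
    rw [show find_all_from_list pattern texts sep
          = PySem.List.pyRange 0 (PySem.List.len texts) 1 by
        simp only [find_all_from_list]; exact if_pos hm0]
    simp only [find_all_from_list_alt, hp, PySem.Chars.isIn_nil]
    simp [PySem.List.map_fst_enumerate, PySem.List.len]
  · have hm : 0 < pattern.toList.length := by omega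
    rcases hpre with hp0 | ⟨hlen1, hall⟩ | hnoccB
    · exact absurd (by rw [hp0]; rfl) hm0
    · obtain ⟨c, hc⟩ := List.length_eq_one_iff.mp hlen1
      have hall' : c ∉ pattern.toList ∧ ∀ t ∈ texts, c ∉ t.toList := by
        rw [hc] at hall
        simpa using hall
      rw [pvA_eq_specIdx2 pattern texts sep hm0 c hc hall'.1 hall'.2,
        pvAlt_eq_idxNat]
      have hnb : pvNoBadBeforeMatch pattern.toList (texts.map String.toList) := by
        apply pvNoBad_of_indices
        intro j hj hmj i hi hbad
        exact hnd ((pvD_iff pattern texts sep).mpr ⟨j, hj, hmj, i, hi, hbad⟩)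
      have := pvSpec_eq_nat pattern.toList (texts.map String.toList) hnb 0
      simpa using this
    · have hnocc : ¬ pattern.toList <:+:
          (PySem.Chars.join sep.toList (texts.map String.toList) ++ sep.toList) := by
        rw [← pvOccB_iff, hnoccB]
        simp
      have hfsp := pvKmpFail_spec pattern.toList hm
      rw [show find_all_from_list pattern texts sep
            = pvMainLoop pattern.toList
                (PySem.Chars.join sep.toList (texts.map String.toList) ++ sep.toList)
                sep.toList (pvKmpFail pattern.toList) pattern.toList.length
                (2 * (PySem.Chars.join sep.toList (texts.map String.toList) ++ sep.toList).length
                  + pattern.toList.length + 1) 0 0 0 [] by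
          simp only [find_all_from_list]; exact if_neg hm0]
      have hno : ∀ e, e ≤ (PySem.Chars.join sep.toList (texts.map String.toList)
            ++ sep.toList).length →
          ¬ pattern.toList <:+ (PySem.Chars.join sep.toList (texts.map String.toList)
            ++ sep.toList).take e :=
        fun e he hocc => hnocc (pvInfix_iff_suffix_take.mpr ⟨e, he, hocc⟩)
      rw [pvScanNoOcc pattern.toList hm sep.toList (pvKmpFail pattern.toList) hfsp _ hno
        _ 0 0 0 [] (by omega) hm (by simp)
        (by
          intro b hb1 hb2 hsuf
          have := hsuf.length_le
          simp only [List.length_take] at this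
          omega)]
      rw [pvAlt_eq_idxNat]
      rw [pvIdxNat_nil_of_nomatch
        (fun v hv hinf => hnocc (hinf.trans (pvMem_infix_join sep.toList
          (texts.map String.toList) v hv))) 0]

theorem find_all_from_list_changed : Claim_changed_find_all_from_list := by
  unfold Claim_changed_find_all_from_list
  decide

theorem find_all_from_list_tight : Claim_exact_find_all_from_list := by
  intro pattern texts sep hdom hpre hd
  obtain ⟨j, hj, hmj, i, hij, hbadi⟩ := (pvD_iff pattern texts sep).mp hd
  have hm0 : ¬ pattern.toList.length = 0 := by
    intro h
    obtain ⟨b, hb0, hbl, _⟩ := hbadi.2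
    omega
  have hmel : pattern.toList <:+:
      (PySem.Chars.join sep.toList (texts.map String.toList) ++ sep.toList) := by
    refine hmj.trans (pvMem_infix_join sep.toList (texts.map String.toList) _ ?_)
    rw [← pvGetD_map_toList]
    exact pvMem_of_getD (by simpa using hj)
  rcases hpre with hp0 | ⟨hlen1, hall⟩ | hnoccB
  · exact absurd (by rw [hp0]; rfl) hm0
  · obtain ⟨c, hc⟩ := List.length_eq_one_iff.mp hlen1
    have hall' : c ∉ pattern.toList ∧ ∀ t ∈ texts, c ∉ t.toList := by
      rw [hc] at hall
      simpa using hall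
    rw [pvA_eq_specIdx2 pattern texts sep hm0 c hc hall'.1 hall'.2, pvAlt_eq_idxNat]
    have hcond : ∃ j, j < (texts.map String.toList).length ∧
        pattern.toList <:+: (texts.map String.toList).getD j [] ∧
        ∃ i, i < j ∧ pvBadP pattern.toList ((texts.map String.toList).getD i []) := by
      refine ⟨j, by simpa using hj, ?_, i, hij, ?_⟩
      · rw [pvGetD_map_toList]; exact hmj
      · rw [pvGetD_map_toList]; exact hbadi
    have := pvL2 pattern.toList (texts.map String.toList) 0 hcond
    simpa using this
  · rw [← pvOccB_iff, hnoccB] at hmel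
    exact absurd hmel (by simp)
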